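-- pv_equiv track=rewrite | github.com/SOBEX/AdventOfCode | 2023/Day21/main.py | simulate_infinite
-- ===== SOURCE A (Python) =====
-- def simulate_infinite(grid, start_r, start_c, steps):
--     H = len(grid)
--     W = len(grid[0]) if H > 0 else 0
--     dirs = [(-1, 0), (1, 0), (0, -1), (0, 1)]
--     current = {(start_r, start_c)}
--
--     for _ in range(steps):
--         next_pos = set()
--         for (x, y) in current:
--             for dx, dy in dirs:
--                 nx, ny = x + dx, y + dy
--                 orig_r = nx % H
--                 orig_c = ny % W
--                 if grid[orig_r][orig_c] != '#':
--                     next_pos.add((nx, ny))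
--         current = next_pos
--     return len(current)
-- ===== SOURCE B (Python) =====
-- def simulate_infinite(grid, start_r, start_c, steps):
--     H = len(grid)
--     W = len(grid[0]) if H > 0 else 0
--     if steps <= 0:
--         return 1
--     DIRS = ((-1, 0), (1, 0), (0, -1), (0, 1))
--
--     def walkable(x, y):
--         return grid[x % H][y % W] != '#'
--
--     # BFS over absolute coordinates: dist maps each discovered cell to its
--     # shortest walk length from the start.
--     dist = {(start_r, start_c): 0}
--     frontier = [(start_r, start_c)]
--     d = 0
--     while frontier and d < steps:
--         d += 1
--         new = []
--         for (x, y) in frontier: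
--             for dx, dy in DIRS:
--                 n = (x + dx, y + dy)
--                 if n not in dist and walkable(n[0], n[1]):
--                     dist[n] = d
--                     new.append(n)
--         frontier = new
--
--     # A cell is occupied after exactly `steps` steps iff it was discovered at a
--     # distance of the same parity and either was discovered at exactly `steps`
--     # or can pad the walk by bouncing to a walkable neighbour and back.
--     cnt = 0
--     for (x, y), dc in dist.items():
--         if (steps - dc) % 2 == 0:
--             if dc == steps or (walkable(x, y) and
--                                any(walkable(x + dx, y + dy) for dx, dy in DIRS)):
--                 cnt += 1
--     return cnt
-- ===== Notes on version B (the rewrite author's own statement) =====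
-- stated objective: alternative
-- what changed: Replaces the per-step re-expansion of the entire occupied set by a single BFS that discovers each cell once with its distance, then counts cells whose distance has the right parity and that either lie at exactly `steps` or can pad the walk (walkable with a walkable neighbour).
-- outside the precondition, e.g. on simulate_infinite(['..', '.'], 0, 0, 1): A returns 4, B returns 4
import Mathlib
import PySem

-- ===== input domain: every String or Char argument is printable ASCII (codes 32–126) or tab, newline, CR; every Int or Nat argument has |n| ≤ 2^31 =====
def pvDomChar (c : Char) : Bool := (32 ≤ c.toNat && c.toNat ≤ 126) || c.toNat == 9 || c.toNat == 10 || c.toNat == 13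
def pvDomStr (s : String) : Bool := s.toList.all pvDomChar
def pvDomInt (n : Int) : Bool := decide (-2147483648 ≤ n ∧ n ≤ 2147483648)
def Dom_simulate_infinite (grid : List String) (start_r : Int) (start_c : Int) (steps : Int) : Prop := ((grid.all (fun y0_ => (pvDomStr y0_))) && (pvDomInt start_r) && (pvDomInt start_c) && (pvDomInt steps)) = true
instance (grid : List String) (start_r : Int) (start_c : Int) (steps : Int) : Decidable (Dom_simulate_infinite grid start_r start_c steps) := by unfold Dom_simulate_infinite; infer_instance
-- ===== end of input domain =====

-- B replaces A's step-by-step re-expansion of the whole occupied set by a single BFS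
-- recording each cell's distance, counting cells of matching parity (alternative algorithm; return value only, no mutation).

-- shared by both ports: the direction list and the modular grid lookup
-- (exact where the indices are in range, i.e. on Pre_; out-of-range reads '#')
def pvDirs : List (Int × Int) := [(-1, 0), (1, 0), (0, -1), (0, 1)]

def pvWalk (grid : List String) (H W x y : Int) : Bool :=
  decide (PySem.List.pyGetD (PySem.List.pyGetD grid (PySem.Int.mod x H) "").toList
            (PySem.Int.mod y W) '#' ≠ '#')

-- ===== PORT A =====
-- the body of A's `for (x, y) in current: for dx, dy in dirs: …` round
def pvStepA (grid : List String) (H W : Int) (cur : PySem.Set (Int × Int)) :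
    PySem.Set (Int × Int) :=
  cur.foldl (fun nxt p =>
    pvDirs.foldl (fun nxt dp =>
      if pvWalk grid H W (p.1 + dp.1) (p.2 + dp.2) then
        PySem.Set.add nxt (p.1 + dp.1, p.2 + dp.2)
      else nxt) nxt) PySem.Set.empty

def simulate_infinite (grid : List String) (start_r : Int) (start_c : Int) (steps : Int) : Int :=
  let H : Int := grid.length
  let W : Int := if H > 0 then PySem.Str.len (PySem.List.pyGetD grid 0 "") else 0
  let current : PySem.Set (Int × Int) := PySem.Set.add PySem.Set.empty (start_r, start_c)
  let final := (PySem.List.pyRange 0 steps 1).foldl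
    (fun cur _ => pvStepA grid H W cur) current
  PySem.Set.len final

-- ===== PORT B =====
-- B's `while frontier and d < steps` BFS loop (fuel = steps - d)
def pvBfs (grid : List String) (H W : Int) :
    Nat → List (Int × Int) → PySem.Dict (Int × Int) Int → Int → PySem.Dict (Int × Int) Int
  | 0, _, dist, _ => dist
  | n + 1, frontier, dist, d =>
    if frontier = [] then dist
    else
      let d' := d + 1
      let st := frontier.foldl (fun (st : PySem.Dict (Int × Int) Int × List (Int × Int)) p =>
        pvDirs.foldl (fun st dp =>
          let nn : Int × Int := (p.1 + dp.1, p.2 + dp.2)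
          if !st.1.contains nn && pvWalk grid H W nn.1 nn.2 then
            (st.1.insert nn d', st.2 ++ [nn])
          else st) st) (dist, [])
      pvBfs grid H W n st.2 st.1 d'

def simulate_infinite_alt (grid : List String) (start_r : Int) (start_c : Int) (steps : Int) : Int :=
  let H : Int := grid.length
  let W : Int := if H > 0 then PySem.Str.len (PySem.List.pyGetD grid 0 "") else 0
  if steps ≤ 0 then 1
  else
    let dist := pvBfs grid H W steps.toNat [(start_r, start_c)]
      ((PySem.Dict.empty).insert (start_r, start_c) 0) 0
    dist.items.foldl (fun cnt kv =>
      if PySem.Int.mod (steps - kv.2) 2 == 0 &&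
         (kv.2 == steps ||
          (pvWalk grid H W kv.1.1 kv.1.2 &&
           pvDirs.any (fun dp => pvWalk grid H W (kv.1.1 + dp.1) (kv.1.2 + dp.2))))
      then cnt + 1 else cnt) 0

-- ===== PRECONDITION & SPEC =====
-- Pre_ excludes only inputs with steps ≥ 1 where A can raise: an empty grid or empty first row
-- (ZeroDivisionError in `% H` / `% W`), and grids with a row shorter than row 0, on which A's
-- indexing may raise IndexError depending on which cells are reachable (on some such grids A
-- happens to return; those are excluded too, see the cited example).
def Pre_simulate_infinite (grid : List String) (start_r : Int) (start_c : Int) (steps : Int) : Prop :=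
  steps ≤ 0 ∨
    (0 < grid.length ∧ 0 < PySem.Str.len (PySem.List.pyGetD grid 0 "") ∧
      ∀ s ∈ grid, PySem.Str.len (PySem.List.pyGetD grid 0 "") ≤ PySem.Str.len s)
instance (grid : List String) (start_r : Int) (start_c : Int) (steps : Int) : Decidable (Pre_simulate_infinite grid start_r start_c steps) := by unfold Pre_simulate_infinite; infer_instance

def pvWitness_simulate_infinite : List String × Int × Int × Int := (["..", ".."], 0, 0, 2)

def Spec_simulate_infinite (grid : List String) (start_r : Int) (start_c : Int) (steps : Int) (out : Int) : Prop := out = simulate_infinite_alt grid start_r start_c steps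
instance (grid : List String) (start_r : Int) (start_c : Int) (steps : Int) (out : Int) : Decidable (Spec_simulate_infinite grid start_r start_c steps out) := by unfold Spec_simulate_infinite; infer_instance

-- ===== CLAIM (what is proved, stated in full; the proofs are below) =====
def Claim_equal_simulate_infinite : Prop := ∀ (grid : List String) (start_r : Int) (start_c : Int) (steps : Int), Dom_simulate_infinite grid start_r start_c steps → Pre_simulate_infinite grid start_r start_c steps → Spec_simulate_infinite grid start_r start_c steps (simulate_infinite grid start_r start_c steps)

-- ===== LEMMAS AND PROOFS =====

-- `pvReach wk s k c`: there is a length-k walk from s to c (each move lands on a `wk` cell) —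
-- membership in A's set after k rounds.
def pvReach (wk : Int × Int → Bool) (s : Int × Int) : Nat → (Int × Int) → Prop
  | 0, c => c = s
  | k + 1, c => wk c = true ∧ ∃ p, pvReach wk s k p ∧ ∃ dp ∈ pvDirs, c = (p.1 + dp.1, p.2 + dp.2)

-- `pvFirst wk s k c`: k is c's BFS distance from s.
def pvFirst (wk : Int × Int → Bool) (s : Int × Int) (k : Nat) (c : Int × Int) : Prop :=
  pvReach wk s k c ∧ ∀ j < k, ¬ pvReach wk s j c

-- c can pad a walk in place: c is walkable and has a walkable neighbour.
def pvPad (wk : Int × Int → Bool) (c : Int × Int) : Prop :=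
  wk c = true ∧ ∃ dp ∈ pvDirs, wk (c.1 + dp.1, c.2 + dp.2) = true

-- A's iteration, abstracted
def pvIt (grid : List String) (H W : Int) (s : Int × Int) : Nat → PySem.Set (Int × Int)
  | 0 => PySem.Set.add PySem.Set.empty s
  | n + 1 => pvStepA grid H W (pvIt grid H W s n)

theorem pv_foldl_addif_mem (wk : (Int × Int) → Bool) (g : (Int × Int) → (Int × Int))
    (l : List (Int × Int)) (acc : PySem.Set (Int × Int)) (c : Int × Int) :
    c ∈ l.foldl (fun nxt dp => if wk (g dp) then PySem.Set.add nxt (g dp) else nxt) acc ↔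
      c ∈ acc ∨ (wk c = true ∧ ∃ dp ∈ l, c = g dp) := by
  induction l generalizing acc with
  | nil => simp
  | cons dp l ih =>
    simp only [List.foldl_cons, ih]
    by_cases h : wk (g dp) = true
    · simp only [h, if_pos, PySem.Set.mem_add]
      constructor
      · rintro (( h1 | rfl) | h2)
        · exact Or.inl h1
        · exact Or.inr ⟨h, dp, by simp⟩
        · exact Or.inr ⟨h2.1, h2.2.imp (fun d hd => ⟨List.mem_cons_of_mem _ hd.1, hd.2⟩)⟩
      · rintro (h1 | ⟨hw, d, hd, rfl⟩)
        · exact Or.inl (Or.inl h1)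
        · rcases List.mem_cons.mp hd with rfl | hd
          · exact Or.inl (Or.inr rfl)
          · exact Or.inr ⟨hw, d, hd, rfl⟩
    · simp only [if_neg h]
      constructor
      · rintro (h1 | ⟨hw, d, hd, rfl⟩)
        · exact Or.inl h1
        · exact Or.inr ⟨hw, d, List.mem_cons_of_mem _ hd, rfl⟩
      · rintro (h1 | ⟨hw, d, hd, rfl⟩)
        · exact Or.inl h1
        · rcases List.mem_cons.mp hd with rfl | hd
          · exact absurd hw h
          · exact Or.inr ⟨hw, d, hd, rfl⟩

theorem pv_foldl_addif_nodup (wk : (Int × Int) → Bool) (g : (Int × Int) → (Int × Int))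
    (l : List (Int × Int)) (acc : PySem.Set (Int × Int)) (h : acc.Nodup) :
    (l.foldl (fun nxt dp => if wk (g dp) then PySem.Set.add nxt (g dp) else nxt) acc).Nodup := by
  induction l generalizing acc with
  | nil => exact h
  | cons dp l ih =>
    simp only [List.foldl_cons]
    split
    · exact ih _ (PySem.Set.nodup_add acc (g dp) h)
    · exact ih _ h

theorem pvStepA_nodup (grid : List String) (H W : Int) (cur : PySem.Set (Int × Int)) :
    (pvStepA grid H W cur).Nodup := by
  unfold pvStepA
  have : ∀ (l : List (Int × Int)) (acc : PySem.Set (Int × Int)), acc.Nodup →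
      (l.foldl (fun nxt p => pvDirs.foldl (fun nxt dp =>
        if pvWalk grid H W (p.1 + dp.1) (p.2 + dp.2) then
          PySem.Set.add nxt (p.1 + dp.1, p.2 + dp.2) else nxt) nxt) acc).Nodup := by
    intro l
    induction l with
    | nil => intro acc h; exact h
    | cons p l ih =>
      intro acc h
      exact ih _ (pv_foldl_addif_nodup (fun c => pvWalk grid H W c.1 c.2)
        (fun dp => (p.1 + dp.1, p.2 + dp.2)) pvDirs acc h)
  exact this _ _ List.nodup_nil

theorem pvStepA_mem (grid : List String) (H W : Int) (cur : PySem.Set (Int × Int)) (c : Int × Int) :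
    c ∈ pvStepA grid H W cur ↔
      pvWalk grid H W c.1 c.2 = true ∧ ∃ p ∈ cur, ∃ dp ∈ pvDirs, c = (p.1 + dp.1, p.2 + dp.2) := by
  unfold pvStepA
  have key : ∀ (l : List (Int × Int)) (acc : PySem.Set (Int × Int)),
      c ∈ l.foldl (fun nxt p => pvDirs.foldl (fun nxt dp =>
        if pvWalk grid H W (p.1 + dp.1) (p.2 + dp.2) then
          PySem.Set.add nxt (p.1 + dp.1, p.2 + dp.2) else nxt) nxt) acc ↔
      c ∈ acc ∨ (pvWalk grid H W c.1 c.2 = true ∧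
        ∃ p ∈ l, ∃ dp ∈ pvDirs, c = (p.1 + dp.1, p.2 + dp.2)) := by
    intro l
    induction l with
    | nil => simp
    | cons p l ih =>
      intro acc
      simp only [List.foldl_cons, ih]
      rw [pv_foldl_addif_mem (fun c => pvWalk grid H W c.1 c.2)
        (fun dp => (p.1 + dp.1, p.2 + dp.2)) pvDirs acc c]
      constructor
      · rintro ((h1 | ⟨hw, d, hd, rfl⟩) | ⟨hw, q, hq, d, hd, rfl⟩)
        · exact Or.inl h1
        · exact Or.inr ⟨hw, p, List.mem_cons_self, d, hd, rfl⟩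
        · exact Or.inr ⟨hw, q, List.mem_cons_of_mem _ hq, d, hd, rfl⟩
      · rintro (h1 | ⟨hw, q, hq, d, hd, rfl⟩)
        · exact Or.inl (Or.inl h1)
        · rcases List.mem_cons.mp hq with rfl | hq
          · exact Or.inl (Or.inr ⟨hw, d, hd, rfl⟩)
          · exact Or.inr ⟨hw, q, hq, d, hd, rfl⟩
  rw [key]
  simp

theorem pvIt_nodup (grid : List String) (H W : Int) (s : Int × Int) (n : Nat) :
    (pvIt grid H W s n).Nodup := by
  cases n with
  | zero => simp [pvIt, PySem.Set.add, PySem.Set.empty]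
  | succ n => exact pvStepA_nodup grid H W _

theorem pvIt_mem (grid : List String) (H W : Int) (s : Int × Int) (n : Nat) (c : Int × Int) :
    c ∈ pvIt grid H W s n ↔ pvReach (fun c => pvWalk grid H W c.1 c.2) s n c := by
  induction n generalizing c with
  | zero => simp [pvIt, pvReach, PySem.Set.add, PySem.Set.empty]
  | succ n ih =>
    show c ∈ pvStepA grid H W (pvIt grid H W s n) ↔ _
    rw [pvStepA_mem]
    unfold pvReach
    constructor
    · rintro ⟨hw, p, hp, hd⟩
      exact ⟨hw, p, (ih p).mp hp, hd⟩
    · rintro ⟨hw, p, hp, hd⟩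
      exact ⟨hw, p, (ih p).mpr hp, hd⟩

-- walks: basic graph facts
theorem pv_dirs_sum (dp : Int × Int) (h : dp ∈ pvDirs) : dp.1 + dp.2 = 1 ∨ dp.1 + dp.2 = -1 := by
  fin_cases h <;> simp

theorem pv_dirs_neg (dp : Int × Int) (h : dp ∈ pvDirs) : (-dp.1, -dp.2) ∈ pvDirs := by
  fin_cases h <;> simp [pvDirs]

theorem pv_dirs_ne_zero (dp : Int × Int) (h : dp ∈ pvDirs) : ¬(dp.1 = 0 ∧ dp.2 = 0) := by
  fin_cases h <;> simp

theorem pvReach_wk (wk : (Int × Int) → Bool) (s : Int × Int) (k : Nat) (c : Int × Int)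
    (h : pvReach wk s (k + 1) c) : wk c = true := h.1

theorem pvReach_parity (wk : (Int × Int) → Bool) (s : Int × Int) (k : Nat) (c : Int × Int)
    (h : pvReach wk s k c) : (c.1 + c.2 - s.1 - s.2 - (k : Int)) % 2 = 0 := by
  induction k generalizing c with
  | zero => rw [show c = s from h]; simp
  | succ k ih =>
    obtain ⟨-, p, hp, dp, hdp, rfl⟩ := h
    have h1 := ih p hp
    have h2 := pv_dirs_sum dp hdp
    simp only at *
    omega

theorem pvReach_pad (wk : (Int × Int) → Bool) (s : Int × Int) (k : Nat) (c : Int × Int)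
    (h : pvReach wk s k c) (hp : pvPad wk c) : pvReach wk s (k + 2) c := by
  obtain ⟨hw, dp, hdp, hwn⟩ := hp
  refine ⟨hw, (c.1 + dp.1, c.2 + dp.2), ⟨hwn, c, h, dp, hdp, rfl⟩,
    (-dp.1, -dp.2), pv_dirs_neg dp hdp, ?_⟩
  ext <;> simp

theorem pvReach_pad_many (wk : (Int × Int) → Bool) (s : Int × Int) (k : Nat) (c : Int × Int)
    (h : pvReach wk s k c) (hp : pvPad wk c) (m : Nat) : pvReach wk s (k + 2 * m) c := by
  induction m with
  | zero => simpa using h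
  | succ m ih =>
    have := pvReach_pad wk s (k + 2 * m) c ih hp
    have e : k + 2 * (m + 1) = k + 2 * m + 2 := by ring
    rw [e]
    exact this

theorem pvFirst_exists (wk : (Int × Int) → Bool) (s : Int × Int) (n : Nat) (c : Int × Int)
    (h : pvReach wk s n c) : ∃ k, k ≤ n ∧ pvFirst wk s k c := by
  induction n using Nat.strong_induction_on with
  | _ n ih =>
    by_cases hj : ∃ j < n, pvReach wk s j c
    · obtain ⟨j, hjn, hjr⟩ := hj
      obtain ⟨k, hk, hf⟩ := ih j hjn hjr
      exact ⟨k, le_of_lt (lt_of_le_of_lt hk hjn), hf⟩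
    · push_neg at hj
      exact ⟨n, le_refl n, h, hj⟩

theorem pvPad_of_lt (wk : (Int × Int) → Bool) (s : Int × Int) (k n : Nat) (c : Int × Int)
    (hk : pvReach wk s k c) (hn : pvReach wk s n c) (hlt : k < n) : pvPad wk c := by
  obtain ⟨m, rfl⟩ : ∃ m, n = m + 1 := ⟨n - 1, by omega⟩
  obtain ⟨hw, b, hb, dp, hdp, rfl⟩ := hn
  refine ⟨hw, (-dp.1, -dp.2), pv_dirs_neg dp hdp, ?_⟩
  have hbeq : ((b.1 + dp.1) + -dp.1, (b.2 + dp.2) + -dp.2) = b := by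
    ext <;> simp
  rw [hbeq]
  cases m with
  | zero =>
    -- b = s and k < 1 so k = 0, c = s: then dp = 0, impossible
    exfalso
    have hb' : b = s := hb
    have hk0 : k = 0 := by omega
    rw [hk0] at hk
    have hc : (b.1 + dp.1, b.2 + dp.2) = s := hk
    apply pv_dirs_ne_zero dp hdp
    rw [hb'] at hc
    have h1 : b.1 + dp.1 = b.1 := by rw [hb']; exact congrArg Prod.fst hc
    have h2 : b.2 + dp.2 = b.2 := by rw [hb']; exact congrArg Prod.snd hc
    constructor <;> omega
  | succ m => exact pvReach_wk wk s m b hb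

-- MAIN: membership after exactly n rounds, characterised by BFS distance
theorem pv_main (wk : (Int × Int) → Bool) (s : Int × Int) (n : Nat) (c : Int × Int) :
    pvReach wk s n c ↔
      ∃ k, k ≤ n ∧ pvFirst wk s k c ∧ ((n : Int) - (k : Int)) % 2 = 0 ∧
        (k = n ∨ pvPad wk c) := by
  constructor
  · intro h
    obtain ⟨k, hk, hf⟩ := pvFirst_exists wk s n c h
    refine ⟨k, hk, hf, ?_, ?_⟩
    · have h1 := pvReach_parity wk s k c hf.1
      have h2 := pvReach_parity wk s n c h
      omega
    · rcases eq_or_lt_of_le hk with rfl | hlt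
      · exact Or.inl rfl
      · exact Or.inr (pvPad_of_lt wk s k n c hf.1 h hlt)
  · rintro ⟨k, hk, hf, hpar, hpad⟩
    rcases hpad with rfl | hpad
    · exact hf.1
    · obtain ⟨m, rfl⟩ : ∃ m, n = k + 2 * m := ⟨(n - k) / 2, by omega⟩
      exact pvReach_pad_many wk s k c hf.1 hpad m

-- ===== BFS side =====

theorem pv_foldl_foldl_pairs {σ α β : Type} (f : σ → α → β → σ) (F : List α) (L : List β)
    (init : σ) :
    F.foldl (fun st p => L.foldl (fun st dp => f st p dp) st) init
      = (F.flatMap (fun p => L.map (fun dp => (p, dp)))).foldl (fun st q => f st q.1 q.2) init := by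
  induction F generalizing init with
  | nil => rfl
  | cons p F ih => simp [List.foldl_append, List.foldl_map, ih]

-- one neighbour-processing step of B's BFS round
def pvRStep (grid : List String) (H W : Int) (d' : Int)
    (st : PySem.Dict (Int × Int) Int × List (Int × Int)) (q : (Int × Int) × (Int × Int)) :
    PySem.Dict (Int × Int) Int × List (Int × Int) :=
  if !st.1.contains (q.1.1 + q.2.1, q.1.2 + q.2.2) &&
      pvWalk grid H W (q.1.1 + q.2.1) (q.1.2 + q.2.2) then
    (st.1.insert (q.1.1 + q.2.1, q.1.2 + q.2.2) d', st.2 ++ [(q.1.1 + q.2.1, q.1.2 + q.2.2)])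
  else st

-- invariant of the inner fold of a round: S = "is a neighbour of a processed frontier cell"
def pvRInv (grid : List String) (H W : Int) (M : PySem.Dict (Int × Int) Int) (d' : Int)
    (st : PySem.Dict (Int × Int) Int × List (Int × Int)) (S : (Int × Int) → Prop) : Prop :=
  st.2.Nodup ∧ st.1.keys.Nodup ∧
  (∀ c, c ∈ st.2 ↔ (pvWalk grid H W c.1 c.2 = true ∧ M.contains c = false ∧ S c)) ∧
  (∀ c v, st.1.get? c = some v ↔ (M.get? c = some v ∨ (v = d' ∧ c ∈ st.2)))

theorem pvRInv_congr (grid : List String) (H W : Int) (M : PySem.Dict (Int × Int) Int) (d' : Int)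
    (st : PySem.Dict (Int × Int) Int × List (Int × Int)) (S S' : (Int × Int) → Prop)
    (hS : ∀ c, S c ↔ S' c) (h : pvRInv grid H W M d' st S) : pvRInv grid H W M d' st S' := by
  obtain ⟨h1, h2, h3, h4⟩ := h
  exact ⟨h1, h2, fun c => (h3 c).trans (by rw [hS c]), h4⟩

theorem pvRStep_inv (grid : List String) (H W : Int) (M : PySem.Dict (Int × Int) Int) (d' : Int)
    (st : PySem.Dict (Int × Int) Int × List (Int × Int)) (S : (Int × Int) → Prop)
    (q : (Int × Int) × (Int × Int)) (h : pvRInv grid H W M d' st S) :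
    pvRInv grid H W M d' (pvRStep grid H W d' st q)
      (fun c => S c ∨ c = (q.1.1 + q.2.1, q.1.2 + q.2.2)) := by
  obtain ⟨h1, h2, h3, h4⟩ := h
  set nn : Int × Int := (q.1.1 + q.2.1, q.1.2 + q.2.2) with hnn
  have hred : pvRStep grid H W d' st q =
      if (!st.1.contains nn && pvWalk grid H W nn.1 nn.2) = true then
        (st.1.insert nn d', st.2 ++ [nn]) else st := rfl
  rw [hred]
  by_cases hcond : (!st.1.contains nn && pvWalk grid H W nn.1 nn.2) = true
  · rw [if_pos hcond]
    have hnc : st.1.contains nn = false := by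
      have hl := (Bool.and_eq_true _ _ |>.mp hcond).1
      simpa using hl
    have hwn : pvWalk grid H W nn.1 nn.2 = true := (Bool.and_eq_true _ _ |>.mp hcond).2
    have hget : st.1.get? nn = none := by
      rw [PySem.Dict.contains_eq_isSome_get?] at hnc
      exact Option.not_isSome_iff_eq_none.mp (by simp [hnc])
    have hnotin2 : nn ∉ st.2 := by
      intro hmem
      have := (h4 nn d').mpr (Or.inr ⟨rfl, hmem⟩)
      rw [hget] at this
      simp at this
    have hMnn : M.contains nn = false := by
      rw [PySem.Dict.contains_eq_isSome_get?]
      cases hM : M.get? nn with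
      | none => rfl
      | some v =>
        have := (h4 nn v).mpr (Or.inl hM)
        rw [hget] at this
        simp at this
    refine ⟨?_, PySem.Dict.nodup_keys_insert _ _ _ h2, ?_, ?_⟩
    · rw [List.nodup_append]
      refine ⟨h1, List.nodup_singleton _, ?_⟩
      intro a ha b hb
      rw [List.mem_singleton] at hb
      subst hb
      intro hab
      exact hnotin2 (hab ▸ ha)
    · intro c
      simp only [List.mem_append, List.mem_singleton]
      constructor
      · rintro (hc | rfl)
        · obtain ⟨hw, hM, hs⟩ := (h3 c).mp hc
          exact ⟨hw, hM, Or.inl hs⟩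
        · exact ⟨hwn, hMnn, Or.inr rfl⟩
      · rintro ⟨hw, hM, hs | rfl⟩
        · exact Or.inl ((h3 c).mpr ⟨hw, hM, hs⟩)
        · exact Or.inr rfl
    · intro c v
      show (st.1.insert nn d').get? c = some v ↔ _
      rw [PySem.Dict.get?_insert]
      by_cases hc : c = nn
      · subst hc
        rw [if_pos rfl]
        constructor
        · intro h'
          have hv : d' = v := Option.some.inj h'
          exact Or.inr ⟨hv.symm, List.mem_append.mpr (Or.inr (List.mem_singleton.mpr rfl))⟩
        · rintro (hM | ⟨rfl, -⟩)
          · have hx := (h4 nn v).mpr (Or.inl hM)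
            rw [hget] at hx
            simp at hx
          · rfl
      · simp only [if_neg hc]
        rw [h4 c v]
        constructor
        · rintro (hM | ⟨rfl, hm⟩)
          · exact Or.inl hM
          · exact Or.inr ⟨rfl, List.mem_append.mpr (Or.inl hm)⟩
        · rintro (hM | ⟨rfl, hm⟩)
          · exact Or.inl hM
          · rcases List.mem_append.mp hm with hm | hm
            · exact Or.inr ⟨rfl, hm⟩
            · exact absurd (List.mem_singleton.mp hm) hc
  · rw [if_neg hcond]
    refine ⟨h1, h2, ?_, h4⟩
    intro c
    rw [h3 c]
    constructor
    · rintro ⟨hw, hM, hs⟩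
      exact ⟨hw, hM, Or.inl hs⟩
    · rintro ⟨hw, hM, hs | rfl⟩
      · exact ⟨hw, hM, hs⟩
      · refine ⟨hw, hM, ?_⟩
        have hct : st.1.contains nn = true := by
          by_contra hcf
          have hcf' : st.1.contains nn = false := by
            cases hb : st.1.contains nn
            · rfl
            · exact absurd hb hcf
          rw [Bool.and_eq_true] at hcond
          push_neg at hcond
          exact absurd hw (hcond (by simp [hcf']))
        rw [PySem.Dict.contains_eq_isSome_get?] at hct
        obtain ⟨v, hv⟩ := Option.isSome_iff_exists.mp hct
        rcases (h4 nn v).mp hv with hMv | ⟨-, hm⟩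
        · rw [PySem.Dict.contains_eq_isSome_get?, hMv] at hM
          exact absurd hM (by simp)
        · exact ((h3 nn).mp hm).2.2

theorem pvRFold_inv (grid : List String) (H W : Int) (M : PySem.Dict (Int × Int) Int) (d' : Int) :
    ∀ (Q : List ((Int × Int) × (Int × Int))) (st : PySem.Dict (Int × Int) Int × List (Int × Int))
      (S : (Int × Int) → Prop), pvRInv grid H W M d' st S →
      pvRInv grid H W M d' (Q.foldl (pvRStep grid H W d') st)
        (fun c => S c ∨ ∃ q ∈ Q, c = (q.1.1 + q.2.1, q.1.2 + q.2.2)) := by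
  intro Q
  induction Q with
  | nil =>
    intro st S h
    exact pvRInv_congr _ _ _ _ _ _ _ _ (fun c => by simp) h
  | cons q Q ih =>
    intro st S h
    have h1 := pvRStep_inv grid H W M d' st S q h
    have h2 := ih _ _ h1
    refine pvRInv_congr _ _ _ _ _ _ _ _ (fun c => ?_) h2
    simp only [List.mem_cons]
    constructor
    · rintro ((hs | rfl) | ⟨r, hr, rfl⟩)
      · exact Or.inl hs
      · exact Or.inr ⟨q, Or.inl rfl, rfl⟩
      · exact Or.inr ⟨r, Or.inr hr, rfl⟩
    · rintro (hs | ⟨r, rfl | hr, rfl⟩)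
      · exact Or.inl (Or.inl hs)
      · exact Or.inl (Or.inr rfl)
      · exact Or.inr ⟨r, hr, rfl⟩

-- the invariant carried between BFS rounds
def pvInv (grid : List String) (H W : Int) (s : Int × Int) (dN : Nat)
    (F : List (Int × Int)) (M : PySem.Dict (Int × Int) Int) : Prop :=
  F.Nodup ∧ M.keys.Nodup ∧
  (∀ c, c ∈ F ↔ pvFirst (fun c => pvWalk grid H W c.1 c.2) s dN c) ∧
  (∀ c v, M.get? c = some v ↔
    ∃ k : Nat, v = (k : Int) ∧ k ≤ dN ∧ pvFirst (fun c => pvWalk grid H W c.1 c.2) s k c)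

theorem pvFirst_succ_pred (wk : (Int × Int) → Bool) (s : Int × Int) (d : Nat) (c : Int × Int)
    (hf : pvFirst wk s (d + 1) c) :
    ∃ b, pvFirst wk s d b ∧ ∃ dp ∈ pvDirs, c = (b.1 + dp.1, b.2 + dp.2) := by
  obtain ⟨⟨hw, b, hb, dp, hdp, rfl⟩, hmin⟩ := hf
  obtain ⟨k, hk, hkf⟩ := pvFirst_exists wk s d b hb
  rcases eq_or_lt_of_le hk with rfl | hlt
  · exact ⟨b, hkf, dp, hdp, rfl⟩
  · exact absurd (⟨hw, b, hkf.1, dp, hdp, rfl⟩ : pvReach wk s (k + 1) _)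
      (hmin (k + 1) (by omega)).elim

theorem pv_no_first_after (wk : (Int × Int) → Bool) (s : Int × Int) (dN : Nat)
    (h : ∀ c, ¬ pvFirst wk s dN c) : ∀ e, dN ≤ e → ∀ c, ¬ pvFirst wk s e c := by
  intro e he
  induction e, he using Nat.le_induction with
  | base => exact h
  | succ e he ih =>
    intro c hf
    obtain ⟨b, hb, -⟩ := pvFirst_succ_pred wk s e c hf
    exact ih b hb

theorem pvFirst_zero (wk : (Int × Int) → Bool) (s : Int × Int) (c : Int × Int) :
    pvFirst wk s 0 c ↔ c = s := by
  constructor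
  · intro h; exact h.1
  · intro h; exact ⟨h, fun j hj => absurd hj (Nat.not_lt_zero j)⟩

theorem pv_round (grid : List String) (H W : Int) (s : Int × Int) (dN : Nat)
    (F : List (Int × Int)) (M : PySem.Dict (Int × Int) Int)
    (h : pvInv grid H W s dN F M) :
    pvInv grid H W s (dN + 1)
      ((F.flatMap (fun p => pvDirs.map (fun dp => (p, dp)))).foldl
        (pvRStep grid H W ((dN : Int) + 1)) (M, [])).2
      ((F.flatMap (fun p => pvDirs.map (fun dp => (p, dp)))).foldl
        (pvRStep grid H W ((dN : Int) + 1)) (M, [])).1 := by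
  obtain ⟨hF, hK, h3, h4⟩ := h
  have h0 : pvRInv grid H W M ((dN : Int) + 1) (M, []) (fun _ => False) :=
    ⟨List.nodup_nil, hK, fun c => by simp, fun c v => by simp⟩
  have hfold := pvRFold_inv grid H W M ((dN : Int) + 1)
    (F.flatMap (fun p => pvDirs.map (fun dp => (p, dp)))) (M, []) _ h0
  set st := (F.flatMap (fun p => pvDirs.map (fun dp => (p, dp)))).foldl
    (pvRStep grid H W ((dN : Int) + 1)) (M, []) with hst
  obtain ⟨g1, g2, g3, g4⟩ := hfold
  have g3' : ∀ c, c ∈ st.2 ↔ (pvWalk grid H W c.1 c.2 = true ∧ M.contains c = false ∧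
      ∃ p ∈ F, ∃ dp ∈ pvDirs, c = (p.1 + dp.1, p.2 + dp.2)) := by
    intro c
    rw [g3 c]
    constructor
    · rintro ⟨hw, hM, (h' | ⟨q, hq, rfl⟩)⟩
      · exact absurd h' not_false
      · obtain ⟨p, hp, dp, hdp, rfl⟩ : ∃ p ∈ F, ∃ dp ∈ pvDirs, q = (p, dp) := by
          obtain ⟨p, hp, hq'⟩ := List.mem_flatMap.mp hq
          obtain ⟨dp, hdp, rfl⟩ := List.mem_map.mp hq'
          exact ⟨p, hp, dp, hdp, rfl⟩
        exact ⟨hw, hM, p, hp, dp, hdp, rfl⟩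
    · rintro ⟨hw, hM, p, hp, dp, hdp, rfl⟩
      refine ⟨hw, hM, Or.inr ⟨(p, dp), ?_, rfl⟩⟩
      exact List.mem_flatMap.mpr ⟨p, hp, List.mem_map.mpr ⟨dp, hdp, rfl⟩⟩
  -- M.contains c = false ↔ no first time ≤ dN
  have hMiff : ∀ c, M.contains c = false ↔
      ¬ ∃ k : Nat, k ≤ dN ∧ pvFirst (fun c => pvWalk grid H W c.1 c.2) s k c := by
    intro c
    rw [PySem.Dict.contains_eq_isSome_get?]
    constructor
    · intro hc ⟨k, hk, hf⟩
      have := (h4 c (k : Int)).mpr ⟨k, rfl, hk, hf⟩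
      rw [this] at hc
      simp at hc
    · intro hno
      cases hv : M.get? c with
      | none => rfl
      | some v =>
        obtain ⟨k, -, hk, hf⟩ := (h4 c v).mp hv
        exact absurd ⟨k, hk, hf⟩ hno
  -- the new frontier is exactly the first-time-(dN+1) cells
  have hfr : ∀ c, c ∈ st.2 ↔ pvFirst (fun c => pvWalk grid H W c.1 c.2) s (dN + 1) c := by
    intro c
    rw [g3' c]
    constructor
    · rintro ⟨hw, hM, p, hp, dp, hdp, rfl⟩
      have hpf := (h3 p).mp hp
      refine ⟨⟨hw, p, hpf.1, dp, hdp, rfl⟩, ?_⟩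
      intro j hj hr
      obtain ⟨k, hk, hkf⟩ := pvFirst_exists _ s j _ hr
      exact (hMiff _).mp hM ⟨k, by omega, hkf⟩
    · intro hf
      obtain ⟨b, hb, dp, hdp, rfl⟩ := pvFirst_succ_pred _ s dN _ hf
      refine ⟨hf.1.1, ?_, b, (h3 b).mpr hb, dp, hdp, rfl⟩
      rw [hMiff]
      rintro ⟨k, hk, hkf⟩
      exact hf.2 k (by omega) hkf.1
  refine ⟨g1, g2, hfr, ?_⟩
  intro c v
  rw [g4 c v]
  constructor
  · rintro (hM | ⟨rfl, hm⟩)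
    · obtain ⟨k, rfl, hk, hf⟩ := (h4 c v).mp hM
      exact ⟨k, rfl, by omega, hf⟩
    · exact ⟨dN + 1, by push_cast; ring, le_refl _, (hfr c).mp hm⟩
  · rintro ⟨k, rfl, hk, hf⟩
    rcases Nat.lt_or_ge k (dN + 1) with hlt | hge
    · exact Or.inl ((h4 c (k : Int)).mpr ⟨k, rfl, by omega, hf⟩)
    · have hkeq : k = dN + 1 := by omega
      subst hkeq
      exact Or.inr ⟨by push_cast; ring, (hfr c).mpr hf⟩

theorem pvBfs_succ (grid : List String) (H W : Int) (n : Nat) (F : List (Int × Int))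
    (M : PySem.Dict (Int × Int) Int) (d : Int) (hF : F ≠ []) :
    pvBfs grid H W (n + 1) F M d = pvBfs grid H W n
      ((F.flatMap (fun p => pvDirs.map (fun dp => (p, dp)))).foldl
        (pvRStep grid H W (d + 1)) (M, [])).2
      ((F.flatMap (fun p => pvDirs.map (fun dp => (p, dp)))).foldl
        (pvRStep grid H W (d + 1)) (M, [])).1
      (d + 1) := by
  have e : F.foldl (fun st p => pvDirs.foldl (fun (st : PySem.Dict (Int × Int) Int × List (Int × Int)) dp =>
        if !st.1.contains (p.1 + dp.1, p.2 + dp.2) &&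
            pvWalk grid H W (p.1 + dp.1) (p.2 + dp.2) then
          (st.1.insert (p.1 + dp.1, p.2 + dp.2) (d + 1), st.2 ++ [(p.1 + dp.1, p.2 + dp.2)])
        else st) st) (M, ([] : List (Int × Int)))
      = (F.flatMap (fun p => pvDirs.map (fun dp => (p, dp)))).foldl
        (pvRStep grid H W (d + 1)) (M, []) :=
    pv_foldl_foldl_pairs (fun st p dp => pvRStep grid H W (d + 1) st (p, dp)) F pvDirs (M, [])
  conv_lhs => rw [pvBfs]
  rw [if_neg hF, ← e]

theorem pvBfs_chr (grid : List String) (H W : Int) (s : Int × Int) :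
    ∀ (n : Nat) (F : List (Int × Int)) (M : PySem.Dict (Int × Int) Int) (dN : Nat),
      pvInv grid H W s dN F M →
      (pvBfs grid H W n F M (dN : Int)).keys.Nodup ∧
      (∀ c v, (pvBfs grid H W n F M (dN : Int)).get? c = some v ↔
        ∃ k : Nat, v = (k : Int) ∧ k ≤ dN + n ∧
          pvFirst (fun c => pvWalk grid H W c.1 c.2) s k c) := by
  intro n
  induction n with
  | zero =>
    intro F M dN h
    exact ⟨h.2.1, fun c v => by simpa using h.2.2.2 c v⟩
  | succ n ih =>
    intro F M dN h
    by_cases hF : F = []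
    · subst hF
      have hred : pvBfs grid H W (n + 1) [] M (dN : Int) = M := by
        rw [pvBfs]
        simp
      rw [hred]
      refine ⟨h.2.1, fun c v => ?_⟩
      rw [h.2.2.2 c v]
      constructor
      · rintro ⟨k, rfl, hk, hf⟩
        exact ⟨k, rfl, by omega, hf⟩
      · rintro ⟨k, rfl, hk, hf⟩
        refine ⟨k, rfl, ?_, hf⟩
        by_contra hgt
        have hdk : dN ≤ k := by omega
        have hnone : ∀ c, ¬ pvFirst (fun c => pvWalk grid H W c.1 c.2) s dN c := by
          intro c' hc'
          exact absurd ((h.2.2.1 c').mpr hc') (List.not_mem_nil)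
        exact pv_no_first_after _ s dN hnone k hdk c hf
    · have hround := pv_round grid H W s dN F M h
      have hcast : ((dN : Int) + 1) = ((dN + 1 : Nat) : Int) := by push_cast; ring
      rw [pvBfs_succ grid H W n F M (dN : Int) hF, hcast]
      rw [hcast] at hround
      obtain ⟨hn1, hn2⟩ := ih _ _ (dN + 1) hround
      refine ⟨hn1, fun c v => ?_⟩
      rw [hn2 c v]
      constructor
      · rintro ⟨k, rfl, hk, hf⟩
        exact ⟨k, rfl, by omega, hf⟩
      · rintro ⟨k, rfl, hk, hf⟩
        exact ⟨k, rfl, by omega, hf⟩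

theorem pvInv_init (grid : List String) (H W : Int) (s : Int × Int) :
    pvInv grid H W s 0 [s] ((PySem.Dict.empty).insert s (0 : Int)) := by
  refine ⟨List.nodup_singleton s,
    PySem.Dict.nodup_keys_insert _ _ _ PySem.Dict.nodup_keys_empty, ?_, ?_⟩
  · intro c
    rw [List.mem_singleton, pvFirst_zero]
  · intro c v
    rw [PySem.Dict.get?_insert]
    by_cases hc : c = s
    · subst hc
      rw [if_pos rfl]
      constructor
      · intro h'
        exact ⟨0, (Option.some.inj h').symm, le_refl 0, (pvFirst_zero _ _ _).mpr rfl⟩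
      · rintro ⟨k, rfl, hk, hf⟩
        have : k = 0 := by omega
        subst this
        rfl
    · simp only [if_neg hc]
      rw [PySem.Dict.get?_empty]
      constructor
      · intro h'; exact absurd h' (by simp)
      · rintro ⟨k, rfl, hk, hf⟩
        have : k = 0 := by omega
        subst this
        exact absurd ((pvFirst_zero _ _ _).mp hf) hc

-- glue for A's port
theorem pvA_iter (grid : List String) (H W : Int) (s : Int × Int) :
    ∀ (l : List Int) (m : Nat),
      l.foldl (fun cur _ => pvStepA grid H W cur) (pvIt grid H W s m)
        = pvIt grid H W s (m + l.length) := by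
  intro l
  induction l with
  | nil => intro m; simp
  | cons x l ih =>
    intro m
    have h1 : pvStepA grid H W (pvIt grid H W s m) = pvIt grid H W s (m + 1) := rfl
    calc (x :: l).foldl (fun cur _ => pvStepA grid H W cur) (pvIt grid H W s m)
        = l.foldl (fun cur _ => pvStepA grid H W cur) (pvIt grid H W s (m + 1)) := by
          rw [List.foldl_cons, h1]
      _ = pvIt grid H W s (m + 1 + l.length) := ih (m + 1)
      _ = pvIt grid H W s (m + (l.length + 1)) := by congr 1; omega
      _ = pvIt grid H W s (m + (x :: l).length) := by rw [List.length_cons]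

theorem pvA_eq (grid : List String) (sr sc steps : Int) :
    simulate_infinite grid sr sc steps =
      ((pvIt grid (grid.length : Int)
        (if (grid.length : Int) > 0 then PySem.Str.len (PySem.List.pyGetD grid 0 "") else 0)
        (sr, sc) steps.toNat).length : Int) := by
  show PySem.Set.len ((PySem.List.pyRange 0 steps 1).foldl
      (fun cur _ => pvStepA grid (grid.length : Int)
        (if (grid.length : Int) > 0 then PySem.Str.len (PySem.List.pyGetD grid 0 "") else 0) cur)
      (pvIt grid (grid.length : Int)
        (if (grid.length : Int) > 0 then PySem.Str.len (PySem.List.pyGetD grid 0 "") else 0)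
        (sr, sc) 0)) = _
  rw [pvA_iter]
  rw [PySem.List.length_pyRange_one]
  show (((pvIt grid (grid.length : Int)
    (if (grid.length : Int) > 0 then PySem.Str.len (PySem.List.pyGetD grid 0 "") else 0)
    (sr, sc) (0 + (steps - 0).toNat)).length : Nat) : Int) = _
  have he : 0 + (steps - 0).toNat = steps.toNat := by omega
  rw [he]

-- decoding B's counting predicate
theorem pv_pdecode (grid : List String) (H W : Int) (steps : Int) (N : Nat)
    (hsN : steps = (N : Int)) (c : Int × Int) (k : Nat) :
    (PySem.Int.mod (steps - (k : Int)) 2 == 0 &&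
      ((k : Int) == steps ||
        (pvWalk grid H W c.1 c.2 &&
          pvDirs.any (fun dp => pvWalk grid H W (c.1 + dp.1) (c.2 + dp.2))))) = true ↔
      (((N : Int) - (k : Int)) % 2 = 0 ∧
        (k = N ∨ pvPad (fun c => pvWalk grid H W c.1 c.2) c)) := by
  subst hsN
  rw [Bool.and_eq_true, Bool.or_eq_true, Bool.and_eq_true]
  rw [show PySem.Int.mod ((N : Int) - (k : Int)) 2 = ((N : Int) - (k : Int)) % 2 from
    PySem.Int.mod_eq_emod_of_pos (by norm_num)]
  constructor
  · rintro ⟨h1, h2⟩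
    refine ⟨by simpa using h1, ?_⟩
    rcases h2 with h2 | ⟨h3, h4⟩
    · exact Or.inl (by exact_mod_cast (beq_iff_eq.mp h2))
    · refine Or.inr ⟨h3, ?_⟩
      obtain ⟨dp, hdp, hw⟩ := List.any_eq_true.mp h4
      exact ⟨dp, hdp, hw⟩
  · rintro ⟨h1, h2⟩
    refine ⟨by simpa using h1, ?_⟩
    rcases h2 with rfl | ⟨h3, dp, hdp, hw⟩
    · exact Or.inl (beq_iff_eq.mpr rfl)
    · exact Or.inr ⟨h3, List.any_eq_true.mpr ⟨dp, hdp, hw⟩⟩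

-- the count over B's dict equals the size of A's final set
theorem pv_card (grid : List String) (H W : Int) (s : Int × Int) (steps : Int) (N : Nat)
    (hsN : steps = (N : Int)) (M : PySem.Dict (Int × Int) Int) (hK : M.keys.Nodup)
    (hchr : ∀ c v, M.get? c = some v ↔ ∃ k : Nat, v = (k : Int) ∧ k ≤ N ∧
      pvFirst (fun c => pvWalk grid H W c.1 c.2) s k c) :
    M.items.countP (fun kv =>
        PySem.Int.mod (steps - kv.2) 2 == 0 &&
        (kv.2 == steps ||
          (pvWalk grid H W kv.1.1 kv.1.2 &&
            pvDirs.any (fun dp => pvWalk grid H W (kv.1.1 + dp.1) (kv.1.2 + dp.2)))))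
      = (pvIt grid H W s N).length := by
  set p : (Int × Int) × Int → Bool := fun kv =>
    PySem.Int.mod (steps - kv.2) 2 == 0 &&
    (kv.2 == steps ||
      (pvWalk grid H W kv.1.1 kv.1.2 &&
        pvDirs.any (fun dp => pvWalk grid H W (kv.1.1 + dp.1) (kv.1.2 + dp.2)))) with hp
  rw [List.countP_eq_length_filter]
  have hlm : ((M.items.filter p).map Prod.fst).length = (M.items.filter p).length :=
    List.length_map _
  rw [← hlm]
  have hnd1 : ((M.items.filter p).map Prod.fst).Nodup := by
    have hsub : List.Sublist ((M.items.filter p).map Prod.fst) (M.items.map Prod.fst) :=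
      List.filter_sublist.map Prod.fst
    exact hsub.nodup hK
  have hnd2 : (pvIt grid H W s N).Nodup := pvIt_nodup grid H W s N
  have hperm : ((M.items.filter p).map Prod.fst).Perm (pvIt grid H W s N) := by
    rw [List.perm_ext_iff_of_nodup hnd1 hnd2]
    intro c
    rw [pvIt_mem, pv_main]
    constructor
    · intro hc
      obtain ⟨kv, hkv, rfl⟩ := List.mem_map.mp hc
      obtain ⟨hmem, hpkv⟩ := List.mem_filter.mp hkv
      have hget : M.get? kv.1 = some kv.2 :=
        (PySem.Dict.get?_eq_some_iff_mem_items M kv.1 kv.2 hK).mpr hmem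
      obtain ⟨k, hv, hk, hf⟩ := (hchr kv.1 kv.2).mp hget
      rw [hp] at hpkv
      simp only at hpkv
      rw [hv] at hpkv
      obtain ⟨hpar, hrest⟩ := (pv_pdecode grid H W steps N hsN kv.1 k).mp hpkv
      exact ⟨k, hk, hf, hpar, hrest⟩
    · rintro ⟨k, hk, hf, hpar, hrest⟩
      have hget : M.get? c = some (k : Int) := (hchr c (k : Int)).mpr ⟨k, rfl, hk, hf⟩
      have hmem : (c, (k : Int)) ∈ M.items :=
        (PySem.Dict.get?_eq_some_iff_mem_items M c (k : Int) hK).mp hget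
      refine List.mem_map.mpr ⟨(c, (k : Int)), List.mem_filter.mpr ⟨hmem, ?_⟩, rfl⟩
      exact (pv_pdecode grid H W steps N hsN c k).mpr ⟨hpar, hrest⟩
  exact hperm.length_eq

theorem simulate_infinite_spec : Claim_equal_simulate_infinite := by
  unfold Claim_equal_simulate_infinite
  intro grid sr sc steps hdom hpre
  unfold Spec_simulate_infinite
  by_cases hs : steps ≤ 0
  · have hA := pvA_eq grid sr sc steps
    have h0 : steps.toNat = 0 := by omega
    rw [h0] at hA
    rw [hA]
    have hB : simulate_infinite_alt grid sr sc steps = 1 := by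
      simp only [simulate_infinite_alt]
      rw [if_pos hs]
    rw [hB]
    rfl
  · have hsN : steps = ((steps.toNat : Nat) : Int) := by omega
    have hinit := pvInv_init grid (grid.length : Int)
      (if (grid.length : Int) > 0 then PySem.Str.len (PySem.List.pyGetD grid 0 "") else 0) (sr, sc)
    have hchr := pvBfs_chr grid (grid.length : Int)
      (if (grid.length : Int) > 0 then PySem.Str.len (PySem.List.pyGetD grid 0 "") else 0) (sr, sc)
      steps.toNat [(sr, sc)] ((PySem.Dict.empty).insert (sr, sc) (0 : Int)) 0 hinit
    rw [Nat.cast_zero] at hchr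
    obtain ⟨hK, hget⟩ := hchr
    simp only [Nat.zero_add] at hget
    have hcard := pv_card grid (grid.length : Int)
      (if (grid.length : Int) > 0 then PySem.Str.len (PySem.List.pyGetD grid 0 "") else 0) (sr, sc)
      steps steps.toNat hsN _ hK hget
    rw [pvA_eq grid sr sc steps]
    have hB : simulate_infinite_alt grid sr sc steps =
        (pvBfs grid (grid.length : Int)
          (if (grid.length : Int) > 0 then PySem.Str.len (PySem.List.pyGetD grid 0 "") else 0)
          steps.toNat [(sr, sc)] ((PySem.Dict.empty).insert (sr, sc) (0 : Int)) 0).items.foldl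
          (fun cnt kv =>
            if PySem.Int.mod (steps - kv.2) 2 == 0 &&
               (kv.2 == steps ||
                (pvWalk grid (grid.length : Int)
                  (if (grid.length : Int) > 0 then PySem.Str.len (PySem.List.pyGetD grid 0 "") else 0)
                  kv.1.1 kv.1.2 &&
                 pvDirs.any (fun dp => pvWalk grid (grid.length : Int)
                  (if (grid.length : Int) > 0 then PySem.Str.len (PySem.List.pyGetD grid 0 "") else 0)
                  (kv.1.1 + dp.1) (kv.1.2 + dp.2))))
            then cnt + 1 else cnt) 0 := by
      simp only [simulate_infinite_alt]
      rw [if_neg hs]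
    rw [hB]
    rw [PySem.List.foldl_if_add_one]
    rw [hcard]
    simp
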